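-- pv_equiv track=rewrite | github.com/JoyAlbertini/dice-game | score_logic.py | nr_of_scoring_dices
-- ===== SOURCE A (Python) =====
-- def nr_of_scoring_dices(verified_choice: list[int]) -> int:
--     match verified_choice:
--         case [1, 2, 3, 4, 5, 6]:
--             return 6  # straight uses all dice
--
--     match verified_choice:
--         case [1, 1, 1, 1, 1, 1]:
--             return 6
--         case [1, 1, 1, 1, 1, *rest]:
--             return 5 + nr_of_scoring_dices(rest)
--         case [1, 1, 1, 1, *rest]:
--             return 4 + nr_of_scoring_dices(rest)
--         case [1, 1, 1, *rest]:
--             return 3 + nr_of_scoring_dices(rest)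
--         case [1, *rest]:
--             return 1 + nr_of_scoring_dices(rest)
--
--     match verified_choice:
--         case [2, 2, 2, 2, 2, 2]:
--             return 6
--         case [2, 2, 2, 2, 2, *rest]:
--             return 5 + nr_of_scoring_dices(rest)
--         case [2, 2, 2, 2, *rest]:
--             return 4 + nr_of_scoring_dices(rest)
--         case [2, 2, 2, *rest]:
--             return 3 + nr_of_scoring_dices(rest)
--
--     match verified_choice:
--         case [3, 3, 3, 3, 3, 3]:
--             return 6
--         case [3, 3, 3, 3, 3, *rest]:
--             return 5 + nr_of_scoring_dices(rest)
--         case [3, 3, 3, 3, *rest]: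
--             return 4 + nr_of_scoring_dices(rest)
--         case [3, 3, 3, *rest]:
--             return 3 + nr_of_scoring_dices(rest)
--
--     match verified_choice:
--         case [4, 4, 4, 4, 4, 4]:
--             return 6
--         case [4, 4, 4, 4, 4, *rest]:
--             return 5 + nr_of_scoring_dices(rest)
--         case [4, 4, 4, 4, *rest]:
--             return 4 + nr_of_scoring_dices(rest)
--         case [4, 4, 4, *rest]:
--             return 3 + nr_of_scoring_dices(rest)
--
--     match verified_choice:
--         case [5, 5, 5, 5, 5, 5]:
--             return 6
--         case [5, 5, 5, 5, 5, *rest]: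
--             return 5 + nr_of_scoring_dices(rest)
--         case [5, 5, 5, 5, *rest]:
--             return 4 + nr_of_scoring_dices(rest)
--         case [5, 5, 5, *rest]:
--             return 3 + nr_of_scoring_dices(rest)
--         case [5, *rest]:
--             return 1 + nr_of_scoring_dices(rest)
--
--     match verified_choice:
--         case [6, 6, 6, 6, 6, 6]:
--             return 6
--         case [6, 6, 6, 6, 6, *rest]:
--             return 5 + nr_of_scoring_dices(rest)
--         case [6, 6, 6, 6, *rest]:
--             return 4 + nr_of_scoring_dices(rest)
--         case [6, 6, 6, *rest]:
--             return 3 + nr_of_scoring_dices(rest)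
--
--     if verified_choice:
--         return nr_of_scoring_dices(verified_choice[1:])
--     else:
--         return 0
-- ===== SOURCE B (Python) =====
-- def nr_of_scoring_dices(verified_choice: list[int]) -> int:
--     # One-pass run-length scan with an accumulator instead of A's 30-case
--     # recursive pattern matcher; O(1) work per die, no list slicing.
--     xs = verified_choice
--     n = len(xs)
--     total = 0
--     i = 0
--     while i < n:
--         if n - i == 6 and xs[i:] == [1, 2, 3, 4, 5, 6]:
--             return total + 6  # straight uses all remaining dice
--         v = xs[i]
--         j = i + 1
--         while j < n and xs[j] == v:
--             j += 1
--         run = j - i  # length of the maximal contiguous run at i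
--         if 1 <= v <= 6:
--             if run == 6 and j == n:
--                 return total + 6  # six of a kind ends the hand
--             if run >= 5:
--                 total += 5
--                 i += 5
--             elif run >= 3:
--                 total += run
--                 i = j
--             elif v == 1 or v == 5:
--                 total += 1
--                 i += 1
--             else:
--                 i += 1
--         else:
--             i += 1
--     return total
-- ===== Notes on version B (the rewrite author's own statement) =====
-- stated objective: faster
-- what changed: Replaces A's 30-case recursive prefix-pattern matcher (which slices the list on every step) with a single iterative run-length scan over the list using an index cursor and an accumulator.
import Mathlib
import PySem

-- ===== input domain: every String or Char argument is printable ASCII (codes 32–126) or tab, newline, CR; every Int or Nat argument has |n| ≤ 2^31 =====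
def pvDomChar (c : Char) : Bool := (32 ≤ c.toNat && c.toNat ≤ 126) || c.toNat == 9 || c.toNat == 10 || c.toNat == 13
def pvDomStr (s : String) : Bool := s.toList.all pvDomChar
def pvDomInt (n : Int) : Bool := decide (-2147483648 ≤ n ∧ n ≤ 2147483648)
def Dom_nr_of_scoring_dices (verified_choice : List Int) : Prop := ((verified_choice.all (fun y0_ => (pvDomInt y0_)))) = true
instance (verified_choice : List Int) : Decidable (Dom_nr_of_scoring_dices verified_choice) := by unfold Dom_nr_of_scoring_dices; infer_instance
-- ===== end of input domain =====

-- B replaces A's 30-case recursive prefix-pattern matcher by a single one-pass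
-- run-length scan with an accumulator (same return value on every list of ints).

-- ===== PORT A =====
-- Python's six sequential `match` statements, cases in the same order; a match
-- statement with no matching case falls through to the next, so the ordered
-- clauses of one Lean match are an exact transliteration (heads are disjoint
-- across the six groups).
def nr_of_scoring_dices (verified_choice : List Int) : Int :=
  match verified_choice with
  | [1, 2, 3, 4, 5, 6] => 6
  | [1, 1, 1, 1, 1, 1] => 6
  | 1 :: 1 :: 1 :: 1 :: 1 :: rest => 5 + nr_of_scoring_dices rest
  | 1 :: 1 :: 1 :: 1 :: rest => 4 + nr_of_scoring_dices rest
  | 1 :: 1 :: 1 :: rest => 3 + nr_of_scoring_dices rest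
  | 1 :: rest => 1 + nr_of_scoring_dices rest
  | [2, 2, 2, 2, 2, 2] => 6
  | 2 :: 2 :: 2 :: 2 :: 2 :: rest => 5 + nr_of_scoring_dices rest
  | 2 :: 2 :: 2 :: 2 :: rest => 4 + nr_of_scoring_dices rest
  | 2 :: 2 :: 2 :: rest => 3 + nr_of_scoring_dices rest
  | [3, 3, 3, 3, 3, 3] => 6
  | 3 :: 3 :: 3 :: 3 :: 3 :: rest => 5 + nr_of_scoring_dices rest
  | 3 :: 3 :: 3 :: 3 :: rest => 4 + nr_of_scoring_dices rest
  | 3 :: 3 :: 3 :: rest => 3 + nr_of_scoring_dices rest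
  | [4, 4, 4, 4, 4, 4] => 6
  | 4 :: 4 :: 4 :: 4 :: 4 :: rest => 5 + nr_of_scoring_dices rest
  | 4 :: 4 :: 4 :: 4 :: rest => 4 + nr_of_scoring_dices rest
  | 4 :: 4 :: 4 :: rest => 3 + nr_of_scoring_dices rest
  | [5, 5, 5, 5, 5, 5] => 6
  | 5 :: 5 :: 5 :: 5 :: 5 :: rest => 5 + nr_of_scoring_dices rest
  | 5 :: 5 :: 5 :: 5 :: rest => 4 + nr_of_scoring_dices rest
  | 5 :: 5 :: 5 :: rest => 3 + nr_of_scoring_dices rest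
  | 5 :: rest => 1 + nr_of_scoring_dices rest
  | [6, 6, 6, 6, 6, 6] => 6
  | 6 :: 6 :: 6 :: 6 :: 6 :: rest => 5 + nr_of_scoring_dices rest
  | 6 :: 6 :: 6 :: 6 :: rest => 4 + nr_of_scoring_dices rest
  | 6 :: 6 :: 6 :: rest => 3 + nr_of_scoring_dices rest
  | _ :: rest => nr_of_scoring_dices rest
  | [] => 0

-- ===== PORT B =====
-- Source B's inner `while` that measures the contiguous run at the cursor.
def pvRunLen (v : Int) : List Int → Nat
  | [] => 0
  | x :: xs => if x = v then 1 + pvRunLen v xs else 0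

-- Source B's outer `while i < n` loop; the cursor/suffix xs[i:] is the list
-- argument, so `n - i == 6 and xs[i:] == [1,2,3,4,5,6]` is `xs = [1,2,3,4,5,6]`
-- and `i += k` is `List.drop k`.
def pvScanLoop (xs : List Int) (total : Int) : Int :=
  match h : xs with
  | [] => total
  | v :: rest =>
    if xs = [1, 2, 3, 4, 5, 6] then total + 6
    else
      let run : Nat := 1 + pvRunLen v rest
      if 1 ≤ v ∧ v ≤ 6 then
        if run = 6 ∧ xs.length = 6 then total + 6
        else if 5 ≤ run then pvScanLoop (xs.drop 5) (total + 5)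
        else if 3 ≤ run then pvScanLoop (xs.drop run) (total + (run : Int))
        else if v = 1 ∨ v = 5 then pvScanLoop rest (total + 1)
        else pvScanLoop rest total
      else pvScanLoop rest total
termination_by xs.length
decreasing_by all_goals subst h; all_goals simp [List.length_drop]

def nr_of_scoring_dices_alt (verified_choice : List Int) : Int :=
  pvScanLoop verified_choice 0

-- ===== PRECONDITION & SPEC =====
def Spec_nr_of_scoring_dices (verified_choice : List Int) (out : Int) : Prop := out = nr_of_scoring_dices_alt verified_choice
instance (verified_choice : List Int) (out : Int) : Decidable (Spec_nr_of_scoring_dices verified_choice out) := by unfold Spec_nr_of_scoring_dices; infer_instance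

-- ===== CLAIM (what is proved, stated in full; the proofs are below) =====
def Claim_equal_nr_of_scoring_dices : Prop := ∀ (verified_choice : List Int), Dom_nr_of_scoring_dices verified_choice → Spec_nr_of_scoring_dices verified_choice (nr_of_scoring_dices verified_choice)

-- ===== LEMMAS AND PROOFS =====

theorem pvScanLoop_acc : ∀ (n : Nat) (xs : List Int) (t : Int), xs.length ≤ n →
    pvScanLoop xs t = t + pvScanLoop xs 0 := by
  intro n
  induction n with
  | zero =>
    intro xs t h
    have : xs = [] := List.eq_nil_of_length_eq_zero (Nat.le_zero.mp h)
    subst this; simp [pvScanLoop]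
  | succ n ih =>
    intro xs t h
    match xs with
    | [] => simp [pvScanLoop]
    | v :: rest =>
      rw [pvScanLoop, pvScanLoop]
      simp only []
      split_ifs with h1 h2 h3 h4 h5 h6 <;> try omega
      · rw [ih ((v :: rest).drop 5) (t + 5) (by simp at h ⊢; omega),
            ih ((v :: rest).drop 5) (0 + 5) (by simp at h ⊢; omega)]
        ring
      · rw [ih ((v :: rest).drop (1 + pvRunLen v rest)) _ (by simp at h ⊢; omega),
            ih ((v :: rest).drop (1 + pvRunLen v rest)) (0 + (1 + pvRunLen v rest : Nat)) (by simp at h ⊢; omega)]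
        ring
      · rw [ih rest (t + 1) (by simp at h ⊢; omega), ih rest (0 + 1) (by simp at h ⊢; omega)]
        ring
      · rw [ih rest t (by simp at h ⊢; omega)]
      · rw [ih rest t (by simp at h ⊢; omega)]

theorem pvScanLoop_acc' (xs : List Int) (t : Int) : pvScanLoop xs t = t + pvScanLoop xs 0 :=
  pvScanLoop_acc xs.length xs t le_rfl

theorem pvRunLen_cons_self (v : Int) (xs : List Int) :
    pvRunLen v (v :: xs) = 1 + pvRunLen v xs := by
  simp [pvRunLen]

theorem pvRunLen_eq_zero (v : Int) (rest : List Int) (h : ∀ ys, rest ≠ v :: ys) :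
    pvRunLen v rest = 0 := by
  cases rest with
  | nil => rfl
  | cons x xs =>
    have hx : x ≠ v := fun hx => h xs (by rw [hx])
    simp [pvRunLen, hx]

theorem pvRunLen_le_one (v : Int) (rest : List Int) (h : ∀ ys, rest ≠ v :: v :: ys) :
    pvRunLen v rest ≤ 1 := by
  cases rest with
  | nil => simp [pvRunLen]
  | cons x xs =>
    by_cases hx : x = v
    · have h0 : pvRunLen v xs = 0 := pvRunLen_eq_zero v xs (fun ys hy => h ys (by rw [hx, hy]))
      simp [pvRunLen, hx, h0]
    · simp [pvRunLen, hx]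

theorem loop5 (v : Int) (hv : 1 ≤ v ∧ v ≤ 6) (rest : List Int) (hr : rest ≠ [v]) :
    pvScanLoop (v :: v :: v :: v :: v :: rest) 0 = 5 + pvScanLoop rest 0 := by
  rw [pvScanLoop]
  have hs : ¬ (v :: v :: v :: v :: v :: rest = ([1, 2, 3, 4, 5, 6] : List Int)) := by
    intro h; simp at h; omega
  rw [if_neg hs]
  simp only [pvRunLen_cons_self]
  rw [if_pos hv]
  have h6 : ¬ (1 + (1 + (1 + (1 + (1 + pvRunLen v rest)))) = 6 ∧
      (v :: v :: v :: v :: v :: rest).length = 6) := by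
    rintro ⟨hrun, hlen⟩
    simp at hlen
    have h1 : pvRunLen v rest = 1 := by omega
    cases rest with
    | nil => simp [pvRunLen] at h1
    | cons x xs =>
      simp at hlen
      subst hlen
      simp [pvRunLen] at h1
      exact hr (by rw [h1])
  rw [if_neg h6, if_pos (by omega)]
  simp only [List.drop_succ_cons, List.drop_zero]
  rw [pvScanLoop_acc']
  omega

theorem loop4 (v : Int) (hv : 1 ≤ v ∧ v ≤ 6) (rest : List Int) (hr : ∀ ys, rest ≠ v :: ys) :
    pvScanLoop (v :: v :: v :: v :: rest) 0 = 4 + pvScanLoop rest 0 := by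
  have h0 := pvRunLen_eq_zero v rest hr
  rw [pvScanLoop]
  have hs : ¬ (v :: v :: v :: v :: rest = ([1, 2, 3, 4, 5, 6] : List Int)) := by
    intro h; simp at h; omega
  rw [if_neg hs]
  simp only [pvRunLen_cons_self, h0]
  rw [if_pos hv, if_neg (by omega), if_neg (by omega), if_pos (by omega)]
  norm_num
  rw [pvScanLoop_acc']

theorem loop3 (v : Int) (hv : 1 ≤ v ∧ v ≤ 6) (rest : List Int) (hr : ∀ ys, rest ≠ v :: ys) :
    pvScanLoop (v :: v :: v :: rest) 0 = 3 + pvScanLoop rest 0 := by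
  have h0 := pvRunLen_eq_zero v rest hr
  rw [pvScanLoop]
  have hs : ¬ (v :: v :: v :: rest = ([1, 2, 3, 4, 5, 6] : List Int)) := by
    intro h; simp at h; omega
  rw [if_neg hs]
  simp only [pvRunLen_cons_self, h0]
  rw [if_pos hv, if_neg (by omega), if_neg (by omega), if_pos (by omega)]
  norm_num
  rw [pvScanLoop_acc']

theorem loop1 (v : Int) (hv : v = 1 ∨ v = 5) (rest : List Int)
    (hr : ∀ ys, rest ≠ v :: v :: ys) (hs : v :: rest ≠ [1, 2, 3, 4, 5, 6]) :
    pvScanLoop (v :: rest) 0 = 1 + pvScanLoop rest 0 := by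
  have h1 := pvRunLen_le_one v rest hr
  rw [pvScanLoop, if_neg hs]
  simp only []
  rw [if_pos (by omega), if_neg (by omega), if_neg (by omega), if_neg (by omega), if_pos hv]
  rw [pvScanLoop_acc']
  omega

theorem loopDropOut (v : Int) (hv : ¬ (1 ≤ v ∧ v ≤ 6)) (rest : List Int) :
    pvScanLoop (v :: rest) 0 = pvScanLoop rest 0 := by
  rw [pvScanLoop]
  have hs : ¬ (v :: rest = ([1, 2, 3, 4, 5, 6] : List Int)) := by
    intro h; simp at h; omega
  rw [if_neg hs]
  simp only []
  rw [if_neg hv]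

theorem loopDropMid (v : Int) (hv : 1 ≤ v ∧ v ≤ 6) (hv15 : ¬ (v = 1 ∨ v = 5))
    (rest : List Int) (hr : ∀ ys, rest ≠ v :: v :: ys) :
    pvScanLoop (v :: rest) 0 = pvScanLoop rest 0 := by
  have h1 := pvRunLen_le_one v rest hr
  rw [pvScanLoop]
  have hs : ¬ (v :: rest = ([1, 2, 3, 4, 5, 6] : List Int)) := by
    intro h; simp at h; omega
  rw [if_neg hs]
  simp only []
  rw [if_pos hv, if_neg (by omega), if_neg (by omega), if_neg (by omega), if_neg hv15]

theorem nr_eq_loop : ∀ (xs : List Int), nr_of_scoring_dices xs = pvScanLoop xs 0 := by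
  intro xs
  fun_induction nr_of_scoring_dices xs with
  | case1 => norm_num [pvScanLoop, pvRunLen]
  | case2 => norm_num [pvScanLoop, pvRunLen]
  | case7 => norm_num [pvScanLoop, pvRunLen]
  | case11 => norm_num [pvScanLoop, pvRunLen]
  | case15 => norm_num [pvScanLoop, pvRunLen]
  | case19 => norm_num [pvScanLoop, pvRunLen]
  | case24 => norm_num [pvScanLoop, pvRunLen]
  | case29 => simp [pvScanLoop]
  | case3 rest h ih => rw [loop5 1 (by omega) rest (fun hc => h hc), ih]
  | case8 rest h ih => rw [loop5 2 (by omega) rest (fun hc => h hc), ih]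
  | case12 rest h ih => rw [loop5 3 (by omega) rest (fun hc => h hc), ih]
  | case16 rest h ih => rw [loop5 4 (by omega) rest (fun hc => h hc), ih]
  | case20 rest h ih => rw [loop5 5 (by omega) rest (fun hc => h hc), ih]
  | case25 rest h ih => rw [loop5 6 (by omega) rest (fun hc => h hc), ih]
  | case4 rest h2 h1 ih => rw [loop4 1 (by omega) rest (fun ys hc => h1 ys hc), ih]
  | case9 rest h2 h1 ih => rw [loop4 2 (by omega) rest (fun ys hc => h1 ys hc), ih]
  | case13 rest h2 h1 ih => rw [loop4 3 (by omega) rest (fun ys hc => h1 ys hc), ih]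
  | case17 rest h2 h1 ih => rw [loop4 4 (by omega) rest (fun ys hc => h1 ys hc), ih]
  | case21 rest h2 h1 ih => rw [loop4 5 (by omega) rest (fun ys hc => h1 ys hc), ih]
  | case26 rest h2 h1 ih => rw [loop4 6 (by omega) rest (fun ys hc => h1 ys hc), ih]
  | case5 rest h3 h2 h1 ih => rw [loop3 1 (by omega) rest (fun ys hc => h1 ys hc), ih]
  | case10 rest h3 h2 h1 ih => rw [loop3 2 (by omega) rest (fun ys hc => h1 ys hc), ih]
  | case14 rest h3 h2 h1 ih => rw [loop3 3 (by omega) rest (fun ys hc => h1 ys hc), ih]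
  | case18 rest h3 h2 h1 ih => rw [loop3 4 (by omega) rest (fun ys hc => h1 ys hc), ih]
  | case22 rest h3 h2 h1 ih => rw [loop3 5 (by omega) rest (fun ys hc => h1 ys hc), ih]
  | case27 rest h3 h2 h1 ih => rw [loop3 6 (by omega) rest (fun ys hc => h1 ys hc), ih]
  | case6 rest h5 h4 h3 h2 h1 ih =>
    rw [loop1 1 (Or.inl rfl) rest (fun ys hc => h1 ys hc)
        (by intro hc; simp at hc; exact h5 (by simp [hc])), ih]
  | case23 rest h4 h3 h2 h1 ih =>
    rw [loop1 5 (Or.inr rfl) rest (fun ys hc => h1 ys hc)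
        (by intro hc; simp at hc), ih]
  | case28 v rest a1 a2 a3 a4 a5 a6 a7 a8 a9 a10 a11 a12 a13 a14 a15 a16 a17 a18 a19 a20 a21 a22 a23 a24 a25 a26 a27 ih =>
    by_cases hv : 1 ≤ v ∧ v ≤ 6
    · have hv1 : v ≠ 1 := fun h => a6 h
      have hv5 : v ≠ 5 := fun h => a23 h
      have hmid : v = 2 ∨ v = 3 ∨ v = 4 ∨ v = 6 := by omega
      have hr2 : ∀ ys, rest ≠ v :: v :: ys := by
        rcases hmid with h|h|h|h <;> subst h <;> intro ys hy
        · exact a10 ys rfl hy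
        · exact a14 ys rfl hy
        · exact a18 ys rfl hy
        · exact a27 ys rfl hy
      rw [loopDropMid v hv (by rintro (h|h) <;> [exact hv1 h; exact hv5 h]) rest hr2, ih]
    · rw [loopDropOut v hv rest, ih]

-- ===== VERDICT (by name: the statement is the Claim_ definition above) =====
theorem nr_of_scoring_dices_spec : Claim_equal_nr_of_scoring_dices := by
  intro xs _
  unfold Spec_nr_of_scoring_dices nr_of_scoring_dices_alt
  exact nr_eq_loop xs
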